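-- pv_equiv track=rewrite | github.com/Jon-H03/CheckersGame | CheckersGame.py | validate_move
-- ===== SOURCE A (Python) =====
-- def validate_move(color: str, starting_square_location: tuple, destination_square_location: tuple):
--     """Validate_move makes sure the player is moving said piece in a diagonal that is one square away."""
--     starting_row = starting_square_location[0]
--     starting_col = starting_square_location[1]
--     starting_col_copy = starting_square_location[1]
--     destination_row = destination_square_location[0]
--     destination_col = destination_square_location[1]
--
--     if color == "White":
--         while starting_row <= destination_row:
--             if starting_row > destination_row:
--                 return False
--             if starting_row == destination_row and starting_col == destination_col or starting_row == destination_row and starting_col_copy == destination_col: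
--                 return True
--             starting_row += 1
--             starting_col += 1
--             starting_col_copy -= 1
--         else:
--             return False
--
--     if color == "Black":
--         while starting_row >= destination_row:
--             if starting_row < destination_row:
--                 return False
--             if starting_row == destination_row and starting_col == destination_col or starting_row == destination_row and starting_col_copy == destination_col:
--                 return True
--             starting_row -= 1
--             starting_col += 1
--             starting_col_copy -= 1
--         else:
--             return False
-- ===== SOURCE B (Python) =====
-- def validate_move(color: str, starting_square_location: tuple, destination_square_location: tuple):
--     """Closed form: a valid move goes `step` rows in the color's forward direction
--     and exactly `step` columns left or right."""
--     if color == "White":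
--         step = destination_square_location[0] - starting_square_location[0]
--     elif color == "Black":
--         step = starting_square_location[0] - destination_square_location[0]
--     else:
--         return None
--     return step >= 0 and abs(destination_square_location[1] - starting_square_location[1]) == step
-- ===== Notes on version B (the rewrite author's own statement) =====
-- stated objective: simpler
-- what changed: Replaced A's per-color step-by-step while-loop that walks the piece row by row (tracking both diagonal column candidates) with a closed-form check: step = signed row distance in the color's direction, valid iff step >= 0 and abs(column delta) == step.
-- outside the precondition, e.g. on validate_move('Red', (0, 0), (1, 1)): A returns None, B returns None
import Mathlib
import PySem

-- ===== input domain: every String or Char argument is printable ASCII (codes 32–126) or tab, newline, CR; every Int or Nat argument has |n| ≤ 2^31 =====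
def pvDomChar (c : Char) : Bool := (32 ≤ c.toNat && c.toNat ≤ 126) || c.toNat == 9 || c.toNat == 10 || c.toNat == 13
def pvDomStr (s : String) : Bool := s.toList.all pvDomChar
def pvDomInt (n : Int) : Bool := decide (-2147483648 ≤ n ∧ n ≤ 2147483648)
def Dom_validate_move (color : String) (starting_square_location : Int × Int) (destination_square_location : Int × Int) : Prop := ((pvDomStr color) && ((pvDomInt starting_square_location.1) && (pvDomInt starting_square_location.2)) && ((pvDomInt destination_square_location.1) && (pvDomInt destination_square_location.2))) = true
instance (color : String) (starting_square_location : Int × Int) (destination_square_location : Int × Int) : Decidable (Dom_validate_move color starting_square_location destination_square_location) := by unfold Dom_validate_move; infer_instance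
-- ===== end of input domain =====

-- B replaces A's row-by-row walking loop by the O(1) closed form
-- 'step ≥ 0 ∧ |column delta| = step' (objective: simpler).

-- ===== PORT A =====
-- A's White while-loop: state (row, col, col_copy); loop runs while row ≤ dr.
def whiteLoop (dr dc : Int) (row col copy : Int) : Bool :=
  if row ≤ dr then
    if row > dr then false     -- dead branch kept from A
    else if (row == dr && col == dc) || (row == dr && copy == dc) then true
    else whiteLoop dr dc (row + 1) (col + 1) (copy - 1)
  else false
termination_by (dr - row + 1).toNat
decreasing_by omega

-- A's Black while-loop: runs while row ≥ dr.
def blackLoop (dr dc : Int) (row col copy : Int) : Bool :=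
  if row ≥ dr then
    if row < dr then false     -- dead branch kept from A
    else if (row == dr && col == dc) || (row == dr && copy == dc) then true
    else blackLoop dr dc (row - 1) (col + 1) (copy - 1)
  else false
termination_by (row - dr + 1).toNat
decreasing_by omega

def validate_move (color : String) (starting_square_location : Int × Int) (destination_square_location : Int × Int) : Bool :=
  let starting_row := starting_square_location.1
  let starting_col := starting_square_location.2
  let starting_col_copy := starting_square_location.2
  let destination_row := destination_square_location.1
  let destination_col := destination_square_location.2
  if color == "White" then
    whiteLoop destination_row destination_col starting_row starting_col starting_col_copy
  else if color == "Black" then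
    blackLoop destination_row destination_col starting_row starting_col starting_col_copy
  else
    false  -- Python A returns None here; excluded by Pre_validate_move

-- ===== PORT B =====
def validate_move_alt (color : String) (starting_square_location : Int × Int) (destination_square_location : Int × Int) : Bool :=
  if color == "White" then
    let step := destination_square_location.1 - starting_square_location.1
    decide (step ≥ 0 ∧ |destination_square_location.2 - starting_square_location.2| = step)
  else if color == "Black" then
    let step := starting_square_location.1 - destination_square_location.1
    decide (step ≥ 0 ∧ |destination_square_location.2 - starting_square_location.2| = step)
  else
    false  -- Python B returns None here; excluded by Pre_validate_move

-- ===== PRECONDITION & SPEC =====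
-- Pre_ excludes colors other than "White"/"Black", on which A (and B) return None, which is not a bool.
def Pre_validate_move (color : String) (starting_square_location : Int × Int) (destination_square_location : Int × Int) : Prop :=
  color = "White" ∨ color = "Black"
instance (color : String) (starting_square_location : Int × Int) (destination_square_location : Int × Int) : Decidable (Pre_validate_move color starting_square_location destination_square_location) := by unfold Pre_validate_move; infer_instance
def pvWitness_validate_move : String × (Int × Int) × (Int × Int) := ("White", (2, 3), (4, 5))

def Spec_validate_move (color : String) (starting_square_location : Int × Int) (destination_square_location : Int × Int) (out : Bool) : Prop := out = validate_move_alt color starting_square_location destination_square_location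
instance (color : String) (starting_square_location : Int × Int) (destination_square_location : Int × Int) (out : Bool) : Decidable (Spec_validate_move color starting_square_location destination_square_location out) := by unfold Spec_validate_move; infer_instance

-- ===== CLAIM (what is proved, stated in full; the proofs are below) =====
def Claim_equal_validate_move : Prop := ∀ (color : String) (starting_square_location : Int × Int) (destination_square_location : Int × Int), Dom_validate_move color starting_square_location destination_square_location → Pre_validate_move color starting_square_location destination_square_location → Spec_validate_move color starting_square_location destination_square_location (validate_move color starting_square_location destination_square_location)

-- ===== LEMMAS AND PROOFS =====
theorem whiteLoop_eq (dr dc : Int) : ∀ (row col copy : Int),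
    whiteLoop dr dc row col copy
      = decide (row ≤ dr ∧ (col + (dr - row) = dc ∨ copy - (dr - row) = dc)) := by
  intro row col copy
  fun_induction whiteLoop dr dc row col copy with
  | case1 row col copy hle hgt => exact absurd hgt (by omega)
  | case2 row col copy hle hgt hhit =>
      simp only [Bool.or_eq_true, Bool.and_eq_true, beq_iff_eq] at hhit
      symm; rw [decide_eq_true_iff]
      exact ⟨by omega, by omega⟩
  | case3 row col copy hle hgt hhit ih =>
      simp only [Bool.or_eq_true, Bool.and_eq_true, beq_iff_eq] at hhit
      push Not at hhit
      rw [ih]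
      simp only [decide_eq_decide]
      constructor <;> rintro ⟨hle', h⟩ <;> exact ⟨by omega, by omega⟩
  | case4 row col copy hle =>
      symm; rw [decide_eq_false_iff_not]
      rintro ⟨h, -⟩; omega

theorem blackLoop_eq (dr dc : Int) : ∀ (row col copy : Int),
    blackLoop dr dc row col copy
      = decide (dr ≤ row ∧ (col + (row - dr) = dc ∨ copy - (row - dr) = dc)) := by
  intro row col copy
  fun_induction blackLoop dr dc row col copy with
  | case1 row col copy hle hlt => exact absurd hlt (by omega)
  | case2 row col copy hle hlt hhit =>
      simp only [Bool.or_eq_true, Bool.and_eq_true, beq_iff_eq] at hhit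
      symm; rw [decide_eq_true_iff]
      exact ⟨by omega, by omega⟩
  | case3 row col copy hle hlt hhit ih =>
      simp only [Bool.or_eq_true, Bool.and_eq_true, beq_iff_eq] at hhit
      push Not at hhit
      rw [ih]
      simp only [decide_eq_decide]
      constructor <;> rintro ⟨hle', h⟩ <;> exact ⟨by omega, by omega⟩
  | case4 row col copy hle =>
      symm; rw [decide_eq_false_iff_not]
      rintro ⟨h, -⟩; omega

-- ===== VERDICT (by name: the statement is the Claim_ definition above) =====
theorem validate_move_spec : Claim_equal_validate_move := by
  intro color s d _ hpre
  unfold Spec_validate_move validate_move validate_move_alt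
  obtain h | h := hpre <;> subst h <;> simp only [beq_self_eq_true, if_true, String.reduceBEq,
    Bool.false_eq_true, if_false, whiteLoop_eq, blackLoop_eq, decide_eq_decide]
  · rcases abs_cases (d.2 - s.2) with ⟨h1, h2⟩ | ⟨h1, h2⟩ <;> constructor <;> rintro ⟨ha, hb⟩ <;>
      refine ⟨by omega, by omega⟩
  · rcases abs_cases (d.2 - s.2) with ⟨h1, h2⟩ | ⟨h1, h2⟩ <;> constructor <;> rintro ⟨ha, hb⟩ <;>
      refine ⟨by omega, by omega⟩
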